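-- pv_equiv track=rewrite | github.com/calincy/HW | HJ20_CodeVeri.py | check
-- ===== SOURCE A (Python) =====
-- def check(s):
--
--     if len(s) <= 8:
--         return 0
--
--     a,b,c,d = 0,0,0,0
--     for item in s:
--         if ord('a') <= ord(item) <= ord('z'):
--             a = 1
--         elif ord('A') <= ord(item) <= ord('Z'):
--             b = 1
--         elif ord('0') <= ord(item) <= ord('9'):
--             c = 1
--         else:             #不是前三种就视为其他符号
--             d = 1
--     if a + b + c + d < 3:
--         return 0
--
--     for i in range(len(s)-2):
--         if len(s.split(s[i:i+3])) >= 3: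
--             return 0
--
--     return 1
-- ===== SOURCE B (Python) =====
-- def check(s):
--     n = len(s)
--     if n <= 8:
--         return 0
--     chars = set(s)
--     classes = (any('a' <= ch <= 'z' for ch in chars)
--                + any('A' <= ch <= 'Z' for ch in chars)
--                + any('0' <= ch <= '9' for ch in chars)
--                + any(not ('a' <= ch <= 'z' or 'A' <= ch <= 'Z' or '0' <= ch <= '9') for ch in chars))
--     if classes < 3:
--         return 0
--     first = {}
--     for i in range(n - 2):
--         g = s[i:i+3]
--         j = first.setdefault(g, i)
--         if j + 3 <= i:
--             return 0
--     return 1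
-- ===== Notes on version B (the rewrite author's own statement) =====
-- stated objective: faster
-- what changed: A re-splits the whole string by every 3-gram (one str.split pass per index, O(n^2) worst case); B makes a single pass keeping each 3-gram's first index in a dict and flags a later occurrence at distance >= 3, and checks the four character classes over set(s) instead of a flag-setting loop over every character.
import Mathlib
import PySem

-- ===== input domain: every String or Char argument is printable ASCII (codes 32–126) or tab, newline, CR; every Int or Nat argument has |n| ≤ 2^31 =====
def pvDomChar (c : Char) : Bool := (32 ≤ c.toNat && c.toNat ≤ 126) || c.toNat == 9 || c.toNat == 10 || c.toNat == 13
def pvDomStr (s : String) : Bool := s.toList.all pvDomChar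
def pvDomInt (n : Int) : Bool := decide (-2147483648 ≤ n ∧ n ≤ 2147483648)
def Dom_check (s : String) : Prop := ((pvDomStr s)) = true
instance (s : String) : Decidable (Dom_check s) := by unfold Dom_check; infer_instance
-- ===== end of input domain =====

-- B replaces A's quadratic "split the whole string by each 3-gram" scan with a single pass
-- keeping each 3-gram's first index in a dict (objective: faster, one pass instead of n splits).

-- ===== PORT A =====
def check (s : String) : Int :=
  if PySem.Str.len s ≤ 8 then 0
  else
    let st := s.toList.foldl (fun (t : Int × Int × Int × Int) item =>
      if 'a'.toNat ≤ item.toNat ∧ item.toNat ≤ 'z'.toNat then (1, t.2.1, t.2.2.1, t.2.2.2)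
      else if 'A'.toNat ≤ item.toNat ∧ item.toNat ≤ 'Z'.toNat then (t.1, 1, t.2.2.1, t.2.2.2)
      else if '0'.toNat ≤ item.toNat ∧ item.toNat ≤ '9'.toNat then (t.1, t.2.1, 1, t.2.2.2)
      else (t.1, t.2.1, t.2.2.1, 1)) ((0 : Int), (0 : Int), (0 : Int), (0 : Int))
    if st.1 + st.2.1 + st.2.2.1 + st.2.2.2 < 3 then 0
    -- the for-loop with "return 0" on the first hit, "return 1" after: ported as List.any
    -- s.split(sep) with sep of length 3 (never empty, so split? is always some): .getD [] is never used
    else if (PySem.List.pyRange 0 (PySem.Str.len s - 2) 1).any (fun i =>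
        3 ≤ ((PySem.Str.split? s (PySem.Str.slice s (some i) (some (i + 3)))).getD []).length)
      then 0 else 1

-- ===== PORT B =====
-- the dict loop of Source B, with "return 0" on the first hit ported as an early-true recursion
def checkAltLoop (cs : List Char) : List Int → PySem.Dict (List Char) Int → Bool
  | [], _ => false
  | i :: rest, first =>
    let g := PySem.List.slice cs (some i) (some (i + 3))
    let j := first.getD g i          -- first.setdefault(g, i)'s returned value
    if j + 3 ≤ i then true
    else checkAltLoop cs rest (first.setdefault g i)

def check_alt (s : String) : Int :=
  let n := PySem.Str.len s
  if n ≤ 8 then 0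
  else
    let chars := PySem.Set.ofList s.toList      -- set(s)
    let classes : Int :=
      (if chars.any (fun ch => 'a' ≤ ch && ch ≤ 'z') then 1 else 0)
      + (if chars.any (fun ch => 'A' ≤ ch && ch ≤ 'Z') then 1 else 0)
      + (if chars.any (fun ch => '0' ≤ ch && ch ≤ '9') then 1 else 0)
      + (if chars.any (fun ch => !(('a' ≤ ch && ch ≤ 'z') || ('A' ≤ ch && ch ≤ 'Z') || ('0' ≤ ch && ch ≤ '9'))) then 1 else 0)
    if classes < 3 then 0
    else if checkAltLoop s.toList (PySem.List.pyRange 0 (n - 2) 1) PySem.Dict.empty then 0 else 1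

-- ===== PRECONDITION & SPEC =====
def Spec_check (s : String) (out : Int) : Prop := out = check_alt s
instance (s : String) (out : Int) : Decidable (Spec_check s out) := by unfold Spec_check; infer_instance

-- ===== CLAIM (what is proved, stated in full; the proofs are below) =====
def Claim_equal_check : Prop := ∀ (s : String), Dom_check s → Spec_check s (check s)


-- ===== LEMMAS AND PROOFS =====
def pvCnt (sep : List Char) : Nat → List Char → Nat
  | 0, _ => 0
  | _ + 1, [] => 0
  | fuel + 1, c :: t =>
      if sep.isPrefixOf (c :: t) then pvCnt sep fuel (List.drop sep.length (c :: t)) + 1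
      else pvCnt sep fuel t

theorem pvGo_length (sep : List Char) (hsep : sep ≠ []) :
    ∀ (fuel : Nat) (l cur : List Char) (acc : List (List Char)), l.length ≤ fuel →
      (PySem.Chars.splitOn.go sep fuel l cur acc).length = acc.length + 1 + pvCnt sep fuel l := by
  intro fuel
  induction fuel with
  | zero =>
    intro l cur acc hl
    have : l = [] := by cases l <;> simp_all
    subst this
    rw [PySem.Chars.splitOn.go]
    simp [pvCnt]
  | succ fuel ih =>
    intro l cur acc hl
    cases l with
    | nil =>
      rw [PySem.Chars.splitOn.go]
      · simp [pvCnt]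
      · omega
    | cons c t =>
      rw [PySem.Chars.splitOn.go]
      by_cases hp : sep.isPrefixOf (c :: t)
      · rw [if_pos hp, ih, pvCnt, if_pos hp]
        · simp; omega
        · have : 1 ≤ sep.length := by cases sep <;> simp_all
          simp at hl ⊢
          omega
      · rw [if_neg hp, ih, pvCnt, if_neg hp]
        simp at hl; omega


theorem pvNoPrefix_nil (sep : List Char) (hsep : sep ≠ []) : ¬ ∃ p : Nat, sep <+: List.drop p ([] : List Char) := by
  rintro ⟨p, h⟩
  rw [List.drop_nil] at h
  exact hsep (List.prefix_nil.mp h)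

theorem pvCnt_one_iff (sep : List Char) (hsep : sep ≠ []) :
    ∀ (fuel : Nat) (l : List Char), l.length ≤ fuel →
      (1 ≤ pvCnt sep fuel l ↔ ∃ p : Nat, sep <+: l.drop p) := by
  intro fuel
  induction fuel with
  | zero =>
    intro l hl
    have : l = [] := by cases l <;> simp_all
    subst this
    have h0 : pvCnt sep 0 [] = 0 := rfl
    rw [h0]
    constructor
    · intro h; exact absurd h (by omega)
    · intro h; exact absurd h (pvNoPrefix_nil sep hsep)
  | succ fuel ih =>
    intro l hl
    cases l with
    | nil =>
      have h0 : pvCnt sep (fuel + 1) [] = 0 := rfl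
      rw [h0]
      constructor
      · intro h; exact absurd h (by omega)
      · intro h; exact absurd h (pvNoPrefix_nil sep hsep)
    | cons c t =>
      rw [show pvCnt sep (fuel + 1) (c :: t)
            = if sep.isPrefixOf (c :: t) then pvCnt sep fuel (List.drop sep.length (c :: t)) + 1
              else pvCnt sep fuel t from rfl]
      by_cases hp : sep.isPrefixOf (c :: t)
      · rw [if_pos hp]
        constructor
        · intro _; exact ⟨0, by simpa using (List.isPrefixOf_iff_prefix.mp hp)⟩
        · intro _; omega
      · rw [if_neg hp]
        rw [ih t (by simp at hl; omega)]
        constructor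
        · rintro ⟨p, hpfx⟩; exact ⟨p + 1, by simpa using hpfx⟩
        · rintro ⟨p, hpfx⟩
          cases p with
          | zero => simp at hpfx; exact absurd (List.isPrefixOf_iff_prefix.mpr hpfx) (by simpa using hp)
          | succ p => exact ⟨p, by simpa using hpfx⟩

theorem pvCnt_two_iff (sep : List Char) (hsep : sep ≠ []) :
    ∀ (fuel : Nat) (l : List Char), l.length ≤ fuel →
      (2 ≤ pvCnt sep fuel l ↔ ∃ p q : Nat, p + sep.length ≤ q ∧ sep <+: l.drop p ∧ sep <+: l.drop q) := by
  intro fuel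
  induction fuel with
  | zero =>
    intro l hl
    have : l = [] := by cases l <;> simp_all
    subst this
    rw [show pvCnt sep 0 [] = 0 from rfl]
    constructor
    · intro h; exact absurd h (by omega)
    · rintro ⟨p, q, _, _, hq⟩
      exact absurd ⟨q, hq⟩ (pvNoPrefix_nil sep hsep)
  | succ fuel ih =>
    intro l hl
    cases l with
    | nil =>
      rw [show pvCnt sep (fuel + 1) [] = 0 from rfl]
      constructor
      · intro h; exact absurd h (by omega)
      · rintro ⟨p, q, _, _, hq⟩
        exact absurd ⟨q, hq⟩ (pvNoPrefix_nil sep hsep)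
    | cons c t =>
      rw [show pvCnt sep (fuel + 1) (c :: t)
            = if sep.isPrefixOf (c :: t) then pvCnt sep fuel (List.drop sep.length (c :: t)) + 1
              else pvCnt sep fuel t from rfl]
      have hk1 : 1 ≤ sep.length := by cases sep <;> simp_all
      by_cases hp : sep.isPrefixOf (c :: t)
      · rw [if_pos hp]
        have hdlen : (List.drop sep.length (c :: t)).length ≤ fuel := by
          simp at hl ⊢; omega
        constructor
        · intro h
          have h1 : 1 ≤ pvCnt sep fuel (List.drop sep.length (c :: t)) := by omega
          obtain ⟨j, hj⟩ := (pvCnt_one_iff sep hsep fuel _ hdlen).mp h1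
          refine ⟨0, sep.length + j, by omega, by simpa using (List.isPrefixOf_iff_prefix.mp hp), ?_⟩
          rwa [List.drop_drop] at hj
        · rintro ⟨p, q, hpq, _, hq⟩
          have h1 : 1 ≤ pvCnt sep fuel (List.drop sep.length (c :: t)) := by
            refine (pvCnt_one_iff sep hsep fuel _ hdlen).mpr ⟨q - sep.length, ?_⟩
            rw [List.drop_drop]
            have : sep.length + (q - sep.length) = q := by omega
            rw [this]
            exact hq
          omega
      · rw [if_neg hp]
        rw [ih t (by simp at hl; omega)]
        constructor
        · rintro ⟨p, q, hpq, hpo, hqo⟩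
          exact ⟨p + 1, q + 1, by omega, by simpa using hpo, by simpa using hqo⟩
        · rintro ⟨p, q, hpq, hpo, hqo⟩
          cases p with
          | zero =>
            simp at hpo
            exact absurd (List.isPrefixOf_iff_prefix.mpr hpo) (by simpa using hp)
          | succ p =>
            cases q with
            | zero => omega
            | succ q => exact ⟨p, q, by omega, by simpa using hpo, by simpa using hqo⟩

def pvGram (cs : List Char) (p : Nat) : List Char := (cs.drop p).take 3

theorem pvSplitOn_three_iff (l sep : List Char) (hsep : sep ≠ []) :
    (3 ≤ (PySem.Chars.splitOn l sep).length ↔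
      ∃ p q : Nat, p + sep.length ≤ q ∧ sep <+: l.drop p ∧ sep <+: l.drop q) := by
  rw [show PySem.Chars.splitOn l sep = PySem.Chars.splitOn.go sep (l.length + 1) l [] [] from rfl]
  rw [pvGo_length sep hsep (l.length + 1) l [] [] (by omega)]
  rw [← pvCnt_two_iff sep hsep (l.length + 1) l (by omega)]
  simp
  omega

theorem pvOcc_iff_gram (cs sep : List Char) (h3 : sep.length = 3) (p : Nat) :
    (sep <+: cs.drop p ↔ p + 3 ≤ cs.length ∧ pvGram cs p = sep) := by
  constructor
  · intro h
    rw [List.prefix_iff_eq_take] at h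
    have hlen := congrArg List.length h
    simp [List.length_take, List.length_drop, h3] at hlen
    refine ⟨by omega, ?_⟩
    rw [pvGram, ← h3, ← h]
  · rintro ⟨hle, hg⟩
    rw [List.prefix_iff_eq_take, h3]
    exact hg.symm


theorem pvSliceGram (s : String) (p : Nat) :
    (PySem.Str.slice s (some ((p : Nat) : Int)) (some (((p : Nat) : Int) + 3))).toList
      = pvGram s.toList p := by
  have h3 : ((p : Nat) : Int) + 3 = ((p : Nat) : Int) + ((3 : Nat) : Int) := by norm_num
  rw [PySem.Str.toList_slice, PySem.Chars.slice_eq_listSlice, h3,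
      PySem.List.slice_natCast_add, pvGram]

theorem pvGram_len (cs : List Char) (p : Nat) (hp : p + 3 ≤ cs.length) :
    (pvGram cs p).length = 3 := by
  rw [pvGram, List.length_take, List.length_drop]
  omega

theorem pvCondA (s : String) (p : Nat) (hp : p + 3 ≤ s.toList.length) :
    ((PySem.Str.split? s (PySem.Str.slice s (some ((p : Nat) : Int)) (some (((p : Nat) : Int) + 3)))).getD []).length
      = (PySem.Chars.splitOn s.toList (pvGram s.toList p)).length := by
  rw [PySem.Str.split?.eq_1, PySem.Chars.split?.eq_1, pvSliceGram]
  have hne : (pvGram s.toList p).isEmpty = false := by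
    have := pvGram_len s.toList p hp
    cases hG : pvGram s.toList p <;> simp_all
  rw [hne]
  simp

def pvRep (cs : List Char) : Prop :=
  ∃ p q : Nat, p + 3 ≤ q ∧ q + 3 ≤ cs.length ∧ pvGram cs p = pvGram cs q

theorem pvGram_ne_nil (cs : List Char) (p : Nat) (hp : p + 3 ≤ cs.length) :
    pvGram cs p ≠ [] := by
  have := pvGram_len cs p hp
  intro h; rw [h] at this; simp at this

theorem pvSplit_three_rep (cs : List Char) (p : Nat) (hp : p + 3 ≤ cs.length) :
    (3 ≤ (PySem.Chars.splitOn cs (pvGram cs p)).length ↔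
      ∃ p' q' : Nat, p' + 3 ≤ q' ∧ q' + 3 ≤ cs.length ∧ pvGram cs p' = pvGram cs q'
        ∧ pvGram cs p' = pvGram cs p) := by
  have hlen := pvGram_len cs p hp
  rw [pvSplitOn_three_iff cs (pvGram cs p) (pvGram_ne_nil cs p hp), hlen]
  constructor
  · rintro ⟨p', q', hle, hp', hq'⟩
    rw [pvOcc_iff_gram cs _ hlen] at hp' hq'
    exact ⟨p', q', hle, hq'.1, hp'.2.trans hq'.2.symm, hp'.2⟩
  · rintro ⟨p', q', hle, hq'n, heq, hep⟩
    refine ⟨p', q', hle, ?_, ?_⟩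
    · rw [pvOcc_iff_gram cs _ hlen]
      have hp'n : p' + 3 ≤ cs.length := by
        have := congrArg List.length heq
        rw [pvGram_len cs q' hq'n] at this
        rw [pvGram, List.length_take, List.length_drop] at this
        omega
      exact ⟨hp'n, hep⟩
    · rw [pvOcc_iff_gram cs _ hlen]
      exact ⟨hq'n, heq.symm.trans hep⟩

theorem pvA_iff (s : String) :
    ((PySem.List.pyRange 0 (PySem.Str.len s - 2) 1).any (fun i =>
        3 ≤ ((PySem.Str.split? s (PySem.Str.slice s (some i) (some (i + 3)))).getD []).length)
      = true ↔ pvRep s.toList) := by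
  rw [List.any_eq_true]
  constructor
  · rintro ⟨i, hmem, hcond⟩
    rw [PySem.List.mem_pyRange_one] at hmem
    obtain ⟨hi0, hiu⟩ := hmem
    rw [PySem.Str.len_eq] at hiu
    set p := i.toNat with hp
    have hip : i = ((p : Nat) : Int) := by omega
    rw [hip] at hcond
    have hpn : p + 3 ≤ s.toList.length := by omega
    rw [decide_eq_true_eq, pvCondA s p hpn] at hcond
    obtain ⟨p', q', h1, h2, h3, _⟩ := (pvSplit_three_rep s.toList p hpn).mp hcond
    exact ⟨p', q', h1, h2, h3⟩
  · rintro ⟨p, q, hle, hq, heq⟩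
    refine ⟨((p : Nat) : Int), ?_, ?_⟩
    · rw [PySem.List.mem_pyRange_one, PySem.Str.len_eq]
      omega
    · have hpn : p + 3 ≤ s.toList.length := by
        have := congrArg List.length heq
        rw [pvGram_len s.toList q hq] at this
        rw [pvGram, List.length_take, List.length_drop] at this
        omega
      rw [decide_eq_true_eq, pvCondA s p hpn]
      exact (pvSplit_three_rep s.toList p hpn).mpr ⟨p, q, hle, hq, heq, rfl⟩

theorem pvFind_range_spec (j : Nat) (pred : Nat → Bool) (p0 : Nat)
    (h : (List.range j).find? pred = some p0) :
    pred p0 = true ∧ p0 < j ∧ ∀ p < p0, pred p = false := by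
  induction j with
  | zero => simp at h
  | succ j ih =>
    rw [List.range_succ, List.find?_append] at h
    cases hj : (List.range j).find? pred with
    | some a =>
      rw [hj] at h
      simp at h
      subst h
      obtain ⟨h1, h2, h3⟩ := ih hj
      exact ⟨h1, by omega, h3⟩
    | none =>
      rw [hj] at h
      simp at h
      obtain ⟨h1, h2⟩ := h
      subst h2
      refine ⟨h1, by omega, ?_⟩
      intro p hp
      have := List.find?_eq_none.mp hj p (by simp; omega)
      simpa using this

theorem pvListSliceGram (cs : List Char) (p : Nat) :
    PySem.List.slice cs (some ((p : Nat) : Int)) (some (((p : Nat) : Int) + 3)) = pvGram cs p := by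
  have h3 : ((p : Nat) : Int) + 3 = ((p : Nat) : Int) + ((3 : Nat) : Int) := by norm_num
  rw [h3, PySem.List.slice_natCast_add, pvGram]

theorem pvLoop_iff (cs : List Char) :
    ∀ (k j : Nat) (d : PySem.Dict (List Char) Int),
      (∀ g, d.get? g = ((List.range j).find? (fun p => pvGram cs p == g)).map (Nat.cast : Nat → Int)) →
      (checkAltLoop cs ((List.range' j k).map (fun p => ((p : Nat) : Int))) d = true ↔
        ∃ q p : Nat, j ≤ q ∧ q < j + k ∧ p + 3 ≤ q ∧ pvGram cs p = pvGram cs q) := by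
  intro k
  induction k with
  | zero =>
    intro j d hinv
    simp [checkAltLoop]
    intro q p hq hq'
    omega
  | succ k ih =>
    intro j d hinv
    rw [List.range'_succ]
    simp only [List.map_cons, checkAltLoop, pvListSliceGram]
    rw [PySem.Dict.getD_eq_get?_getD, hinv (pvGram cs j)]
    cases hF : (List.range j).find? (fun p => pvGram cs p == pvGram cs j) with
    | some p0 =>
      obtain ⟨hpred, hlt, hmin⟩ := pvFind_range_spec j _ p0 hF
      simp only [Option.map_some, Option.getD_some]
      by_cases hc : (p0 : Int) + 3 ≤ (j : Int)
      · rw [if_pos hc]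
        simp only [true_iff]
        exact ⟨j, p0, le_refl j, by omega, by exact_mod_cast hc, by simpa using hpred⟩
      · rw [if_neg hc]
        have hcont : d.contains (pvGram cs j) = true := by
          rw [PySem.Dict.contains_eq_isSome_get?, hinv, hF]; rfl
        rw [PySem.Dict.setdefault_of_contains d _ hcont]
        have hinv' : ∀ g, d.get? g =
            ((List.range (j+1)).find? (fun p => pvGram cs p == g)).map (Nat.cast : Nat → Int) := by
          intro g
          rw [List.range_succ, List.find?_append]
          cases hg : (List.range j).find? (fun p => pvGram cs p == g) with
          | some a => rw [hinv, hg]; rfl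
          | none =>
            rw [hinv, hg]
            simp only [Option.none_or]
            by_cases hgj : pvGram cs j = g
            · subst hgj; rw [hg] at hF; simp at hF
            · simp [hgj]
        rw [ih (j+1) d hinv']
        constructor
        · rintro ⟨q, p, h1, h2, h3, h4⟩
          exact ⟨q, p, by omega, by omega, h3, h4⟩
        · rintro ⟨q, p, h1, h2, h3, h4⟩
          refine ⟨q, p, ?_, by omega, h3, h4⟩
          rcases Nat.eq_or_lt_of_le h1 with he | hl
          · exfalso
            subst he
            have hple : p0 ≤ p := by
              by_contra hplt
              have := hmin p (by omega)
              simp [h4] at this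
            omega
          · omega
    | none =>
      simp only [Option.map_none, Option.getD_none]
      rw [if_neg (by omega)]
      have hcont : d.contains (pvGram cs j) = false := by
        rw [PySem.Dict.contains_eq_isSome_get?, hinv, hF]; rfl
      rw [PySem.Dict.setdefault_of_not_contains d _ hcont]
      have hinv' : ∀ g, (d.insert (pvGram cs j) ((j : Nat) : Int)).get? g =
          ((List.range (j+1)).find? (fun p => pvGram cs p == g)).map (Nat.cast : Nat → Int) := by
        intro g
        rw [List.range_succ, List.find?_append]
        by_cases hgj : pvGram cs j = g
        · subst hgj
          rw [PySem.Dict.get?_insert_self, hF]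
          simp
        · rw [PySem.Dict.get?_insert_of_ne d _ (fun h => hgj h.symm), hinv]
          cases hg : (List.range j).find? (fun p => pvGram cs p == g) with
          | some a => rfl
          | none => simp [hgj]
      rw [ih (j+1) _ hinv']
      constructor
      · rintro ⟨q, p, h1, h2, h3, h4⟩
        exact ⟨q, p, by omega, by omega, h3, h4⟩
      · rintro ⟨q, p, h1, h2, h3, h4⟩
        refine ⟨q, p, ?_, by omega, h3, h4⟩
        rcases Nat.eq_or_lt_of_le h1 with he | hl
        · exfalso
          subst he
          have : (List.range j).find? (fun p => pvGram cs p == pvGram cs j) ≠ none := by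
            intro hn
            have := List.find?_eq_none.mp hn p (by simp; omega)
            simp [h4] at this
          exact this hF
        · omega

theorem pvB_iff (s : String) (h9 : 9 ≤ s.toList.length) :
    (checkAltLoop s.toList (PySem.List.pyRange 0 (PySem.Str.len s - 2) 1) PySem.Dict.empty = true
      ↔ pvRep s.toList) := by
  have hlen : PySem.Str.len s - 2 = ((s.toList.length - 2 : Nat) : Int) := by
    rw [PySem.Str.len_eq]; omega
  rw [hlen, PySem.List.pyRange_zero_natCast, List.range_eq_range']
  have hinv : ∀ g, (PySem.Dict.empty : PySem.Dict (List Char) Int).get? g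
      = ((List.range 0).find? (fun p => pvGram s.toList p == g)).map (Nat.cast : Nat → Int) := by
    intro g
    rw [PySem.Dict.get?_empty]
    rfl
  rw [pvLoop_iff s.toList (s.toList.length - 2) 0 PySem.Dict.empty hinv]
  constructor
  · rintro ⟨q, p, _, h2, h3, h4⟩
    exact ⟨p, q, h3, by omega, h4⟩
  · rintro ⟨p, q, h1, h2, h3⟩
    exact ⟨q, p, by omega, by omega, h1, h3⟩


theorem pvAny_ofList (l : List Char) (p : Char → Bool) :
    (PySem.Set.ofList l).any p = l.any p := by
  rw [Bool.eq_iff_iff, List.any_eq_true, List.any_eq_true]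
  constructor
  · rintro ⟨x, hx, hp⟩
    exact ⟨x, (PySem.Set.mem_ofList l x).mp hx, hp⟩
  · rintro ⟨x, hx, hp⟩
    exact ⟨x, (PySem.Set.mem_ofList l x).mpr hx, hp⟩

theorem pvFold_classes (l : List Char) : ∀ (a0 b0 c0 d0 : Int),
    l.foldl (fun (t : Int × Int × Int × Int) item =>
      if 'a'.toNat ≤ item.toNat ∧ item.toNat ≤ 'z'.toNat then (1, t.2.1, t.2.2.1, t.2.2.2)
      else if 'A'.toNat ≤ item.toNat ∧ item.toNat ≤ 'Z'.toNat then (t.1, 1, t.2.2.1, t.2.2.2)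
      else if '0'.toNat ≤ item.toNat ∧ item.toNat ≤ '9'.toNat then (t.1, t.2.1, 1, t.2.2.2)
      else (t.1, t.2.1, t.2.2.1, 1)) (a0, b0, c0, d0)
    = (if l.any (fun ch => 'a' ≤ ch && ch ≤ 'z') then 1 else a0,
       if l.any (fun ch => 'A' ≤ ch && ch ≤ 'Z') then 1 else b0,
       if l.any (fun ch => '0' ≤ ch && ch ≤ '9') then 1 else c0,
       if l.any (fun ch => !(('a' ≤ ch && ch ≤ 'z') || ('A' ≤ ch && ch ≤ 'Z') || ('0' ≤ ch && ch ≤ '9'))) then 1 else d0) := by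
  induction l with
  | nil => intro a0 b0 c0 d0; simp
  | cons c t ih =>
    intro a0 b0 c0 d0
    have hlow : ('a'.toNat ≤ c.toNat ∧ c.toNat ≤ 'z'.toNat) ↔ ('a' ≤ c && c ≤ 'z') = true := by
      simp only [Bool.and_eq_true, decide_eq_true_eq, Char.le_def, UInt32.le_iff_toNat_le]
      exact Iff.rfl
    have hup : ('A'.toNat ≤ c.toNat ∧ c.toNat ≤ 'Z'.toNat) ↔ ('A' ≤ c && c ≤ 'Z') = true := by
      simp only [Bool.and_eq_true, decide_eq_true_eq, Char.le_def, UInt32.le_iff_toNat_le]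
      exact Iff.rfl
    have hdig : ('0'.toNat ≤ c.toNat ∧ c.toNat ≤ '9'.toNat) ↔ ('0' ≤ c && c ≤ '9') = true := by
      simp only [Bool.and_eq_true, decide_eq_true_eq, Char.le_def, UInt32.le_iff_toNat_le]
      exact Iff.rfl
    have ea : 'a'.toNat = 97 := rfl
    have ez : 'z'.toNat = 122 := rfl
    have eA : 'A'.toNat = 65 := rfl
    have eZ : 'Z'.toNat = 90 := rfl
    have e0 : '0'.toNat = 48 := rfl
    have e9 : '9'.toNat = 57 := rfl
    rw [List.foldl_cons]
    by_cases h1 : 'a'.toNat ≤ c.toNat ∧ c.toNat ≤ 'z'.toNat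
    · rw [if_pos h1, ih]
      have hb : ('a' ≤ c && c ≤ 'z') = true := hlow.mp h1
      have hb2 : ('A' ≤ c && c ≤ 'Z') = false := by
        rw [← Bool.not_eq_true]; intro h
        have := hup.mpr h; omega
      have hb3 : ('0' ≤ c && c ≤ '9') = false := by
        rw [← Bool.not_eq_true]; intro h
        have := hdig.mpr h; omega
      simp only [List.any_cons, hb, hb2, hb3]
      simp
    · rw [if_neg h1]
      have hb1 : ('a' ≤ c && c ≤ 'z') = false := by
        rw [← Bool.not_eq_true]; exact fun h => h1 (hlow.mpr h)
      by_cases h2 : 'A'.toNat ≤ c.toNat ∧ c.toNat ≤ 'Z'.toNat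
      · rw [if_pos h2, ih]
        have hb : ('A' ≤ c && c ≤ 'Z') = true := hup.mp h2
        have hb3 : ('0' ≤ c && c ≤ '9') = false := by
          rw [← Bool.not_eq_true]; intro h
          have := hdig.mpr h; omega
        simp only [List.any_cons, hb, hb1, hb3]
        simp
      · rw [if_neg h2]
        have hb2 : ('A' ≤ c && c ≤ 'Z') = false := by
          rw [← Bool.not_eq_true]; exact fun h => h2 (hup.mpr h)
        by_cases h3 : '0'.toNat ≤ c.toNat ∧ c.toNat ≤ '9'.toNat
        · rw [if_pos h3, ih]
          have hb : ('0' ≤ c && c ≤ '9') = true := hdig.mp h3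
          simp only [List.any_cons, hb, hb1, hb2]
          simp
        · rw [if_neg h3, ih]
          have hb3 : ('0' ≤ c && c ≤ '9') = false := by
            rw [← Bool.not_eq_true]; exact fun h => h3 (hdig.mpr h)
          simp only [List.any_cons, hb1, hb2, hb3]
          simp

-- ===== VERDICT (by name: the statement is the Claim_ definition above) =====
theorem check_spec : Claim_equal_check := by
  intro s _
  unfold Spec_check check check_alt
  dsimp only
  by_cases h8 : PySem.Str.len s ≤ 8
  · rw [if_pos h8, if_pos h8]
  · have h9 : 9 ≤ s.toList.length := by
      rw [PySem.Str.len_eq] at h8; omega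
    rw [if_neg h8, if_neg h8, pvFold_classes]
    dsimp only
    rw [pvAny_ofList, pvAny_ofList, pvAny_ofList, pvAny_ofList]
    by_cases hc : (if s.toList.any (fun ch => 'a' ≤ ch && ch ≤ 'z') then (1:Int) else 0)
        + (if s.toList.any (fun ch => 'A' ≤ ch && ch ≤ 'Z') then 1 else 0)
        + (if s.toList.any (fun ch => '0' ≤ ch && ch ≤ '9') then 1 else 0)
        + (if s.toList.any (fun ch => !(('a' ≤ ch && ch ≤ 'z') || ('A' ≤ ch && ch ≤ 'Z') || ('0' ≤ ch && ch ≤ '9'))) then 1 else 0) < 3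
    · rw [if_pos hc, if_pos hc]
    · rw [if_neg hc, if_neg hc]
      by_cases hrep : pvRep s.toList
      · rw [if_pos ((pvA_iff s).mpr hrep), if_pos ((pvB_iff s h9).mpr hrep)]
      · rw [if_neg (fun h => hrep ((pvA_iff s).mp h)),
            if_neg (fun h => hrep ((pvB_iff s h9).mp h))]
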